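-- pv_equiv track=rewrite | github.com/jameswmccarty/AdventOfCode | 2023/day21.py | walk_dists
-- ===== SOURCE A (Python) =====
-- from collections import deque
--
-- def walk_dists(plots,start,max_steps):
-- 	dists = dict()
-- 	q = deque()
-- 	seen = set()
-- 	dists[start] = 0
-- 	seen.add(start)
-- 	q.append((start,0))
-- 	while q:
-- 		pos,steps = q.popleft()
-- 		dists[pos] = steps
-- 		if steps < max_steps:
-- 			x,y = pos
-- 			for dx,dy in ((0,1),(1,0),(0,-1),(-1,0)):
-- 				p2 = (x+dx,y+dy)
-- 				if p2 not in seen and p2 in plots: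
-- 					q.append((p2,steps+1))
-- 					seen.add(p2)
-- 	return dists
-- ===== SOURCE B (Python) =====
-- def _insort(pq, item):
--     i = len(pq)
--     while i > 0 and pq[i - 1] > item:
--         i -= 1
--     pq.insert(i, item)
--
-- def walk_dists(plots, start, max_steps):
--     # lazy Dijkstra on the unit-weight grid graph: ordered priority queue of
--     # (dist, tie-break counter, pos); no visited set -- a node is finalized the
--     # first time it is popped, later queue duplicates are skipped.
--     dists = {}
--     pq = [(0, 0, start)]
--     cnt = 1
--     while pq:
--         d, _, pos = pq.pop(0)
--         if pos in dists:
--             continue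
--         dists[pos] = d
--         if d < max_steps:
--             x, y = pos
--             for dx, dy in ((0, 1), (1, 0), (0, -1), (-1, 0)):
--                 p2 = (x + dx, y + dy)
--                 if p2 in plots and p2 not in dists:
--                     _insort(pq, (d + 1, cnt, p2))
--                     cnt += 1
--     return dists
-- ===== Notes on version B (the rewrite author's own statement) =====
-- stated objective: alternative
-- what changed: Replaces A's BFS (FIFO deque of (pos, steps) pairs with a visited-on-enqueue seen set) by a lazy Dijkstra on the unit-weight grid: an ordered priority queue of (dist, tie-break counter, pos) triples maintained by sorted insertion, no visited set, nodes finalized at first pop and stale queue duplicates skipped.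
import Mathlib
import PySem

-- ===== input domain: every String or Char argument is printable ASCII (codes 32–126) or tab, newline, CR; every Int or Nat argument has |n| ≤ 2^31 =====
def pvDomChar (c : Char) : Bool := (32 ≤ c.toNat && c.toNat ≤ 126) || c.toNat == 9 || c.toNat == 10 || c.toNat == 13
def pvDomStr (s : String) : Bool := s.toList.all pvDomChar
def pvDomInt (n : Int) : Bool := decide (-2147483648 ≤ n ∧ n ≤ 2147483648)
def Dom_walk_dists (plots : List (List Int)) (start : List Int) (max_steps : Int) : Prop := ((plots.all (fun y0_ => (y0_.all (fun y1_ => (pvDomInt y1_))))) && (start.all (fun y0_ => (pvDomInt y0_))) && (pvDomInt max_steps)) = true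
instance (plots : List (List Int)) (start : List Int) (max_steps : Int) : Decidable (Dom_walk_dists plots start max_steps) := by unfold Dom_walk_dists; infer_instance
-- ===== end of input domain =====

-- B replaces A's FIFO-queue BFS with its visited-on-enqueue set by a lazy Dijkstra: an ordered
-- priority queue of (dist, counter, pos) triples kept by sorted insertion, no visited set,
-- nodes finalized at first pop, stale duplicates skipped (objective: alternative algorithm).

-- ===== PORT A =====
-- the four neighbour offsets ((0,1),(1,0),(0,-1),(-1,0))
def pvDirs : List (Int × Int) := [(0, 1), (1, 0), (0, -1), (-1, 0)]

-- termination-measure helper (not part of A's code): number of distinct plots not yet seen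
def pvUnseen (plots : List (List Int)) (seen : PySem.Set (List Int)) : Nat :=
  ((PySem.List.dedup plots).filter (fun p => !(PySem.Set.contains seen p))).length

-- body of A's 'for dx,dy in …' loop (state = (queue, seen)); p2 = (x+dx, y+dy)
def pvStepA (plots : List (List Int)) (steps x y : Int)
    (st : List (List Int × Int) × PySem.Set (List Int)) (d : Int × Int) :
    List (List Int × Int) × PySem.Set (List Int) :=
  if !(PySem.Set.contains st.2 [x + d.1, y + d.2]) && plots.contains [x + d.1, y + d.2] then
    (st.1 ++ [([x + d.1, y + d.2], steps + 1)], PySem.Set.add st.2 [x + d.1, y + d.2])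
  else st

-- 'x,y = pos' plus the inner for loop
def pvExpandA (plots : List (List Int)) (pos : List Int) (steps : Int)
    (q : List (List Int × Int)) (seen : PySem.Set (List Int)) :
    List (List Int × Int) × PySem.Set (List Int) :=
  match pos with
  | [x, y] => pvDirs.foldl (pvStepA plots steps x y) (q, seen)
  | _ => (q, seen)  -- Python raises ValueError at 'x,y = pos'; excluded by Pre_walk_dists

theorem pvUnseen_add (plots : List (List Int)) (seen : PySem.Set (List Int)) (p2 : List Int)
    (hp : plots.contains p2 = true) (hs : PySem.Set.contains seen p2 = false) :
    pvUnseen plots (PySem.Set.add seen p2) + 1 = pvUnseen plots seen := by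
  have hadd : PySem.Set.add seen p2 = seen ++ [p2] := by
    have : p2 ∉ seen := by simpa [PySem.Set.contains] using hs
    simp [PySem.Set.add, PySem.Set.contains, this]
  unfold pvUnseen
  rw [hadd]
  have hff : ((PySem.List.dedup plots).filter (fun p => !(PySem.Set.contains (seen ++ [p2]) p)))
      = ((PySem.List.dedup plots).filter (fun p => !(PySem.Set.contains seen p))).filter
          (fun p => !(p == p2)) := by
    rw [List.filter_filter]
    apply List.filter_congr
    intro a _
    by_cases h : a = p2 <;> simp [PySem.Set.contains, h]
  rw [hff]
  set m := ((PySem.List.dedup plots).filter (fun p => !(PySem.Set.contains seen p))) with hm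
  have hnd : m.Nodup := (PySem.List.nodup_dedup plots).filter _
  have hmem : p2 ∈ m := by
    rw [hm]
    have hns : p2 ∉ seen := by simpa [PySem.Set.contains] using hs
    refine List.mem_filter.2 ⟨?_, by simp [PySem.Set.contains, hns]⟩
    rw [PySem.List.mem_dedup]
    simpa using hp
  have he : m.filter (fun p => !(p == p2)) = m.erase p2 := by
    rw [List.Nodup.erase_eq_filter hnd]
    apply List.filter_congr
    intro a _
    by_cases h : a = p2 <;> simp [h, bne]
  rw [he, List.length_erase_of_mem hmem]
  have := List.length_pos_of_mem hmem
  omega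

theorem pvFoldA_measure (plots : List (List Int)) (steps x y : Int) :
    ∀ (ds : List (Int × Int)) (q : List (List Int × Int)) (seen : PySem.Set (List Int)),
      (ds.foldl (pvStepA plots steps x y) (q, seen)).1.length
        + pvUnseen plots (ds.foldl (pvStepA plots steps x y) (q, seen)).2
      ≤ q.length + pvUnseen plots seen := by
  intro ds
  induction ds with
  | nil => intro q seen; simp
  | cons d ds ih =>
    intro q seen
    rw [List.foldl_cons]
    by_cases hc : (!(PySem.Set.contains seen [x + d.1, y + d.2])
        && plots.contains [x + d.1, y + d.2]) = true
    · have hc' := hc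
      simp only [Bool.and_eq_true, Bool.not_eq_true'] at hc'
      have hstep : pvStepA plots steps x y (q, seen) d
          = (q ++ [([x + d.1, y + d.2], steps + 1)], PySem.Set.add seen [x + d.1, y + d.2]) := by
        unfold pvStepA; rw [if_pos hc]
      rw [hstep]
      have h2 := ih (q ++ [([x + d.1, y + d.2], steps + 1)]) (PySem.Set.add seen [x + d.1, y + d.2])
      have h3 := pvUnseen_add plots seen [x + d.1, y + d.2] hc'.2 hc'.1
      simp only [List.length_append, List.length_cons, List.length_nil] at h2 ⊢
      omega
    · have hstep : pvStepA plots steps x y (q, seen) d = (q, seen) := by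
        unfold pvStepA; rw [if_neg hc]
      rw [hstep]
      exact ih q seen

theorem pvExpandA_measure (plots : List (List Int)) (pos : List Int) (steps : Int)
    (q : List (List Int × Int)) (seen : PySem.Set (List Int)) :
    (pvExpandA plots pos steps q seen).1.length + pvUnseen plots (pvExpandA plots pos steps q seen).2
      ≤ q.length + pvUnseen plots seen := by
  unfold pvExpandA
  match pos with
  | [] => simp
  | [_] => simp
  | [x, y] => exact pvFoldA_measure plots steps x y pvDirs q seen
  | _ :: _ :: _ :: _ => simp

-- A's 'while q:' loop
def pvLoopA (plots : List (List Int)) (max_steps : Int) :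
    List (List Int × Int) → PySem.Dict (List Int) Int → PySem.Set (List Int) →
    PySem.Dict (List Int) Int
  | [], dists, _ => dists
  | (pos, steps) :: q, dists, seen =>
      let dists' := dists.insert pos steps
      if steps < max_steps then
        let r := pvExpandA plots pos steps q seen
        pvLoopA plots max_steps r.1 dists' r.2
      else
        pvLoopA plots max_steps q dists' seen
  termination_by q _ seen => q.length + pvUnseen plots seen
  decreasing_by
  · have h := pvExpandA_measure plots pos steps q seen
    simp only [List.length_cons]
    omega
  · simp only [List.length_cons]; omega

def walk_dists (plots : List (List Int)) (start : List Int) (max_steps : Int) :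
    List (List Int × Int) :=
  let dists := (PySem.Dict.empty : PySem.Dict (List Int) Int).insert start 0
  let seen := PySem.Set.add (PySem.Set.empty : PySem.Set (List Int)) start
  (pvLoopA plots max_steps [(start, 0)] dists seen).items

-- ===== PORT B =====
-- B's neighbour offsets ((0,1),(1,0),(0,-1),(-1,0))
def pvDirsD : List (Int × Int) := [(0, 1), (1, 0), (0, -1), (-1, 0)]

-- Python '<' on int tuples (positions), lexicographic
def pvListLt : List Int → List Int → Bool
  | [], [] => false
  | [], _ :: _ => true
  | _ :: _, [] => false
  | a :: as, b :: bs =>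
      if a < b then true else if b < a then false else pvListLt as bs

-- Python '<' on the (dist, counter, pos) priority triples, lexicographic
def pvTripleLt (a b : Int × Int × List Int) : Bool :=
  if a.1 < b.1 then true else if b.1 < a.1 then false
  else if a.2.1 < b.2.1 then true else if b.2.1 < a.2.1 then false
  else pvListLt a.2.2 b.2.2

-- B's _insort, on the reversed list: walk left past elements > item …
def pvInsortRev (item : Int × Int × List Int) :
    List (Int × Int × List Int) → List (Int × Int × List Int)
  | [] => [item]
  | x :: rest => if pvTripleLt item x then x :: pvInsortRev item rest else item :: x :: rest

-- … i.e. _insort(pq, item): scan i from len(pq) down while pq[i-1] > item, insert at i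
def pvInsort (pq : List (Int × Int × List Int)) (item : Int × Int × List Int) :
    List (Int × Int × List Int) :=
  (pvInsortRev item pq.reverse).reverse

-- lemmas the port needs for totality (membership/length of the queue after a push)
theorem pvInsortRev_mem (item e : Int × Int × List Int) :
    ∀ l, e ∈ pvInsortRev item l → e ∈ l ∨ e = item := by
  intro l
  induction l with
  | nil => intro h; simp [pvInsortRev] at h; exact Or.inr h
  | cons x rest ih =>
    intro h
    unfold pvInsortRev at h
    split at h
    · rcases List.mem_cons.1 h with h | h
      · exact Or.inl (h ▸ List.mem_cons_self)
      · rcases ih h with h | h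
        · exact Or.inl (List.mem_cons_of_mem _ h)
        · exact Or.inr h
    · rcases List.mem_cons.1 h with h | h
      · exact Or.inr h
      · exact Or.inl h

theorem pvInsort_mem (pq : List (Int × Int × List Int)) (item e : Int × Int × List Int)
    (h : e ∈ pvInsort pq item) : e ∈ pq ∨ e = item := by
  unfold pvInsort at h
  rcases pvInsortRev_mem item e pq.reverse (List.mem_reverse.1 h) with h | h
  · exact Or.inl (List.mem_reverse.1 h)
  · exact Or.inr h

theorem pvInsortRev_length (item : Int × Int × List Int) :
    ∀ l, (pvInsortRev item l).length = l.length + 1 := by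
  intro l
  induction l with
  | nil => simp [pvInsortRev]
  | cons x rest ih => unfold pvInsortRev; split <;> simp [ih]

theorem pvInsort_length (pq : List (Int × Int × List Int)) (item : Int × Int × List Int) :
    (pvInsort pq item).length = pq.length + 1 := by
  unfold pvInsort
  simp [pvInsortRev_length]

-- body of B's 'for dx,dy in …' loop (state = (pq, cnt)); p2 = (x+dx, y+dy)
def pvStepD (plots : List (List Int)) (d x y : Int) (dists : PySem.Dict (List Int) Int)
    (st : List (Int × Int × List Int) × Int) (dir : Int × Int) :
    List (Int × Int × List Int) × Int :=
  if plots.contains [x + dir.1, y + dir.2] && !(dists.contains [x + dir.1, y + dir.2]) then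
    (pvInsort st.1 (d + 1, st.2, [x + dir.1, y + dir.2]), st.2 + 1)
  else st

-- 'x, y = pos' plus the inner for loop
def pvExpandD (plots : List (List Int)) (d : Int) (dists : PySem.Dict (List Int) Int)
    (pos : List Int) (pq : List (Int × Int × List Int)) (cnt : Int) :
    List (Int × Int × List Int) × Int :=
  match pos with
  | [x, y] => pvDirsD.foldl (pvStepD plots d x y dists) (pq, cnt)
  | _ => (pq, cnt)  -- Python raises ValueError at 'x, y = pos'; excluded by Pre_walk_dists

theorem pvFoldD_facts (plots : List (List Int)) (d x y : Int)
    (dists : PySem.Dict (List Int) Int) :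
    ∀ (ds : List (Int × Int)) (pq : List (Int × Int × List Int)) (cnt : Int),
      (ds.foldl (pvStepD plots d x y dists) (pq, cnt)).1.length ≤ pq.length + ds.length
      ∧ ∀ e ∈ (ds.foldl (pvStepD plots d x y dists) (pq, cnt)).1, e ∈ pq ∨ e.2.2 ∈ plots := by
  intro ds
  induction ds with
  | nil => exact fun pq cnt => ⟨by simp, fun e he => Or.inl he⟩
  | cons dir ds ih =>
    intro pq cnt
    rw [List.foldl_cons]
    by_cases hc : (plots.contains [x + dir.1, y + dir.2]
        && !(dists.contains [x + dir.1, y + dir.2])) = true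
    · have hstep : pvStepD plots d x y dists (pq, cnt) dir
          = (pvInsort pq (d + 1, cnt, [x + dir.1, y + dir.2]), cnt + 1) := by
        unfold pvStepD; rw [if_pos hc]
      rw [hstep]
      obtain ⟨ih1, ih2⟩ := ih (pvInsort pq (d + 1, cnt, [x + dir.1, y + dir.2])) (cnt + 1)
      constructor
      · rw [pvInsort_length] at ih1
        simp only [List.length_cons]
        omega
      · intro e he
        rcases ih2 e he with h | h
        · rcases pvInsort_mem _ _ _ h with h | h
          · exact Or.inl h
          · refine Or.inr ?_
            subst h
            have : plots.contains [x + dir.1, y + dir.2] = true := by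
              simp only [Bool.and_eq_true] at hc; exact hc.1
            exact List.mem_of_elem_eq_true this
        · exact Or.inr h
    · have hstep : pvStepD plots d x y dists (pq, cnt) dir = (pq, cnt) := by
        unfold pvStepD; rw [if_neg hc]
      rw [hstep]
      obtain ⟨ih1, ih2⟩ := ih pq cnt
      refine ⟨?_, fun e he => ih2 e he⟩
      simp only [List.length_cons]
      omega

theorem pvExpandD_length (plots : List (List Int)) (d : Int)
    (dists : PySem.Dict (List Int) Int) (pos : List Int)
    (pq : List (Int × Int × List Int)) (cnt : Int) :
    (pvExpandD plots d dists pos pq cnt).1.length ≤ pq.length + 4 := by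
  unfold pvExpandD
  match pos with
  | [] => simp
  | [_] => simp
  | [x, y] => exact (pvFoldD_facts plots d x y dists pvDirsD pq cnt).1
  | _ :: _ :: _ :: _ => simp

theorem pvExpandD_mem (plots : List (List Int)) (d : Int)
    (dists : PySem.Dict (List Int) Int) (pos : List Int)
    (pq : List (Int × Int × List Int)) (cnt : Int)
    (e : Int × Int × List Int) (he : e ∈ (pvExpandD plots d dists pos pq cnt).1) :
    e ∈ pq ∨ e.2.2 ∈ plots := by
  unfold pvExpandD at he
  match pos with
  | [] => exact Or.inl he
  | [_] => exact Or.inl he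
  | [x, y] => exact (pvFoldD_facts plots d x y dists pvDirsD pq cnt).2 e he
  | _ :: _ :: _ :: _ => exact Or.inl he

-- termination-measure helper (not part of B's code): distinct not-yet-finalized candidates
def pvUnseenD (univ : List (List Int)) (dists : PySem.Dict (List Int) Int) : Nat :=
  ((PySem.List.dedup univ).filter (fun p => !(dists.contains p))).length

theorem pvUnseenD_insert (univ : List (List Int)) (dists : PySem.Dict (List Int) Int)
    (pos : List Int) (v : Int) (hmem : pos ∈ univ) (hc : dists.contains pos = false) :
    pvUnseenD univ (dists.insert pos v) + 1 = pvUnseenD univ dists := by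
  unfold pvUnseenD
  have hff : ((PySem.List.dedup univ).filter (fun p => !((dists.insert pos v).contains p)))
      = ((PySem.List.dedup univ).filter (fun p => !(dists.contains p))).filter
          (fun p => !(p == pos)) := by
    rw [List.filter_filter]
    apply List.filter_congr
    intro a _
    by_cases h : a = pos <;> simp [PySem.Dict.contains_insert, h]
  rw [hff]
  set m := ((PySem.List.dedup univ).filter (fun p => !(dists.contains p))) with hm
  have hnd : m.Nodup := (PySem.List.nodup_dedup univ).filter _
  have hmem2 : pos ∈ m := by
    rw [hm]
    refine List.mem_filter.2 ⟨?_, by simp [hc]⟩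
    rw [PySem.List.mem_dedup]
    exact hmem
  have he : m.filter (fun p => !(p == pos)) = m.erase pos := by
    rw [List.Nodup.erase_eq_filter hnd]
    apply List.filter_congr
    intro a _
    by_cases h : a = pos <;> simp [h, bne]
  rw [he, List.length_erase_of_mem hmem2]
  have := List.length_pos_of_mem hmem2
  omega

-- B's 'while pq:' loop; the proof argument (positions come from start or plots) only
-- serves the termination measure and does not influence the computation
def pvLoopD (plots : List (List Int)) (start : List Int) (max_steps : Int) :
    (pq : List (Int × Int × List Int)) → (dists : PySem.Dict (List Int) Int) → (cnt : Int) →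
    (∀ e ∈ pq, e.2.2 = start ∨ e.2.2 ∈ plots) → PySem.Dict (List Int) Int
  | [], dists, _, _ => dists
  | (d, _, pos) :: pq, dists, cnt, h =>
      if hc : dists.contains pos then
        pvLoopD plots start max_steps pq dists cnt
          (fun e he => h e (List.mem_cons_of_mem _ he))
      else
        if d < max_steps then
          pvLoopD plots start max_steps (pvExpandD plots d (dists.insert pos d) pos pq cnt).1
            (dists.insert pos d) (pvExpandD plots d (dists.insert pos d) pos pq cnt).2
            (fun e he =>
              match pvExpandD_mem plots d (dists.insert pos d) pos pq cnt e he with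
              | Or.inl hin => h e (List.mem_cons_of_mem _ hin)
              | Or.inr hp => Or.inr hp)
        else
          pvLoopD plots start max_steps pq (dists.insert pos d) cnt
            (fun e he => h e (List.mem_cons_of_mem _ he))
  termination_by pq dists _ _ => pq.length + 5 * pvUnseenD (start :: plots) dists
  decreasing_by
  · simp only [List.length_cons]; omega
  · have hlen := pvExpandD_length plots d (dists.insert pos d) pos pq cnt
    have hmem : pos ∈ start :: plots := by
      rcases h (d, _, pos) List.mem_cons_self with h' | h'
      · exact h' ▸ List.mem_cons_self
      · exact List.mem_cons_of_mem _ h'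
    have hU := pvUnseenD_insert (start :: plots) dists pos d hmem (by simpa using hc)
    simp only [List.length_cons]
    omega
  · have hmem : pos ∈ start :: plots := by
      rcases h (d, _, pos) List.mem_cons_self with h' | h'
      · exact h' ▸ List.mem_cons_self
      · exact List.mem_cons_of_mem _ h'
    have hU := pvUnseenD_insert (start :: plots) dists pos d hmem (by simpa using hc)
    simp only [List.length_cons]
    omega

def walk_dists_alt (plots : List (List Int)) (start : List Int) (max_steps : Int) :
    List (List Int × Int) :=
  (pvLoopD plots start max_steps [(0, 0, start)] (PySem.Dict.empty : PySem.Dict (List Int) Int) 1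
      (fun e he => Or.inl (by simp at he; simp [he]))).items

-- ===== PRECONDITION & SPEC =====
-- Pre_ excludes exactly the inputs where Python A raises ValueError: with max_steps ≥ 1 the
-- loop unpacks 'x,y = start', which fails unless start has exactly two components (B raises too).
def Pre_walk_dists (plots : List (List Int)) (start : List Int) (max_steps : Int) : Prop :=
  max_steps < 1 ∨ start.length = 2
instance (plots : List (List Int)) (start : List Int) (max_steps : Int) :
    Decidable (Pre_walk_dists plots start max_steps) := by unfold Pre_walk_dists; infer_instance

def pvWitness_walk_dists : List (List Int) × List Int × Int :=
  ([[0, 1], [1, 0], [1, 1]], [0, 0], 2)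

def Spec_walk_dists (plots : List (List Int)) (start : List Int) (max_steps : Int) (out : List (List Int × Int)) : Prop := out = walk_dists_alt plots start max_steps
instance (plots : List (List Int)) (start : List Int) (max_steps : Int) (out : List (List Int × Int)) : Decidable (Spec_walk_dists plots start max_steps out) := by unfold Spec_walk_dists; infer_instance

-- ===== CLAIM (what is proved, stated in full; the proofs are below) =====
def Claim_equal_walk_dists : Prop := ∀ (plots : List (List Int)) (start : List Int) (max_steps : Int), Dom_walk_dists plots start max_steps → Pre_walk_dists plots start max_steps → Spec_walk_dists plots start max_steps (walk_dists plots start max_steps)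

-- ===== LEMMAS AND PROOFS =====

-- the subsequence of B's queue that A's queue tracks: first occurrences of not-yet-finalized
-- positions, each paired with its queued distance (the accumulator is the shared dict)
def pvFreshD (dists : PySem.Dict (List Int) Int) :
    List (Int × Int × List Int) → List (List Int × Int)
  | [] => []
  | (s, _, p) :: rest =>
      if dists.contains p then pvFreshD dists rest
      else (p, s) :: pvFreshD (dists.insert p s) rest

theorem pvFreshD_append_stale (dists : PySem.Dict (List Int) Int)
    (l : List (Int × Int × List Int)) (e : Int × Int × List Int)
    (h : dists.contains e.2.2 = true ∨ e.2.2 ∈ l.map (fun x => x.2.2)) :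
    pvFreshD dists (l ++ [e]) = pvFreshD dists l := by
  induction l generalizing dists with
  | nil =>
    obtain ⟨s, c, p⟩ := e
    simp only [List.map_nil, List.not_mem_nil, or_false] at h
    simp [pvFreshD, h]
  | cons a l ih =>
    obtain ⟨s, c, p⟩ := a
    simp only [List.cons_append]
    by_cases hc : dists.contains p = true
    · simp only [pvFreshD, hc, if_true]
      apply ih
      rcases h with h | h
      · exact Or.inl h
      · simp only [List.map_cons, List.mem_cons] at h
        rcases h with h | h
        · exact Or.inl (h ▸ hc)
        · exact Or.inr h
    · simp only [pvFreshD, hc, Bool.false_eq_true, if_false, List.cons.injEq, true_and]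
      apply ih
      rcases h with h | h
      · exact Or.inl (by rw [PySem.Dict.contains_insert]; simp [h])
      · simp only [List.map_cons, List.mem_cons] at h
        rcases h with h | h
        · exact Or.inl (by rw [PySem.Dict.contains_insert]; simp [h])
        · exact Or.inr h

theorem pvFreshD_append_fresh (dists : PySem.Dict (List Int) Int)
    (l : List (Int × Int × List Int)) (e : Int × Int × List Int)
    (h1 : dists.contains e.2.2 = false) (h2 : e.2.2 ∉ l.map (fun x => x.2.2)) :
    pvFreshD dists (l ++ [e]) = pvFreshD dists l ++ [(e.2.2, e.1)] := by
  induction l generalizing dists with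
  | nil =>
    obtain ⟨s, c, p⟩ := e
    simp [pvFreshD, h1]
  | cons a l ih =>
    obtain ⟨s, c, p⟩ := a
    simp only [List.map_cons, List.mem_cons, not_or] at h2
    obtain ⟨h2a, h2b⟩ := h2
    simp only [List.cons_append]
    by_cases hc : dists.contains p = true
    · simp only [pvFreshD, hc, if_true]
      exact ih dists h1 h2b
    · simp only [pvFreshD, hc, Bool.false_eq_true, if_false, List.cons_append, List.cons.injEq,
        true_and]
      apply ih
      · rw [PySem.Dict.contains_insert]
        simp [h1, h2a]
      · exact h2b

theorem pvInsortRev_of_all (item : Int × Int × List Int) (l : List (Int × Int × List Int))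
    (h : ∀ e ∈ l, pvTripleLt item e = false) : pvInsortRev item l = item :: l := by
  cases l with
  | nil => rfl
  | cons x rest =>
    unfold pvInsortRev
    simp [h x List.mem_cons_self]

theorem pvInsort_append_of_ge (pq : List (Int × Int × List Int)) (item : Int × Int × List Int)
    (h : ∀ e ∈ pq, pvTripleLt item e = false) : pvInsort pq item = pq ++ [item] := by
  unfold pvInsort
  rw [pvInsortRev_of_all item pq.reverse (fun e he => h e (List.mem_reverse.1 he))]
  simp

theorem pvSetContainsAdd (s : PySem.Set (List Int)) (x y : List Int) :
    PySem.Set.contains (PySem.Set.add s x) y = (PySem.Set.contains s y || (y == x)) := by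
  by_cases h : y = x <;> by_cases h2 : x ∈ s <;>
    simp [PySem.Set.add, PySem.Set.contains, h, h2]

-- the freshly pushed triple compares ≥ everything already queued (so _insort appends)
theorem pvPushGe (s cnt : Int) (p2 : List Int) (pq : List (Int × Int × List Int))
    (hcnt : ∀ e ∈ pq, e.2.1 < cnt) (hhi : ∀ e ∈ pq, e.1 ≤ s + 1) :
    ∀ e ∈ pq, pvTripleLt (s + 1, cnt, p2) e = false := by
  intro e he
  have h1 := hhi e he
  have h2 := hcnt e he
  simp only [pvTripleLt]
  split_ifs <;> first | rfl | omega

-- joint invariant of A's seen set and B's queue relative to the shared dict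
def pvInvD (s : Int) (dists : PySem.Dict (List Int) Int) (seen : PySem.Set (List Int))
    (pq : List (Int × Int × List Int)) (cnt : Int) : Prop :=
  (∀ p, PySem.Set.contains seen p = (dists.contains p || pq.any (fun e => e.2.2 == p)))
  ∧ (∀ e ∈ pq, e.2.1 < cnt) ∧ (∀ e ∈ pq, e.1 ≤ s + 1) ∧ (∀ e ∈ pq, s ≤ e.1)
  ∧ pq.Pairwise (fun a b => a.1 ≤ b.1)

theorem pvStepCorr (plots : List (List Int)) (s x y : Int)
    (dists : PySem.Dict (List Int) Int) (seen : PySem.Set (List Int))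
    (pq : List (Int × Int × List Int)) (cnt : Int) (dir : Int × Int)
    (hinv : pvInvD s dists seen pq cnt) :
    pvStepA plots s x y (pvFreshD dists pq, seen) dir
        = (pvFreshD dists (pvStepD plots s x y dists (pq, cnt) dir).1,
           (pvStepA plots s x y (pvFreshD dists pq, seen) dir).2)
    ∧ pvInvD s dists (pvStepA plots s x y (pvFreshD dists pq, seen) dir).2
        (pvStepD plots s x y dists (pq, cnt) dir).1
        (pvStepD plots s x y dists (pq, cnt) dir).2 := by
  obtain ⟨hseen, hcnt, hhi, hlo, hsort⟩ := hinv
  set p2 : List Int := [x + dir.1, y + dir.2] with hp2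
  have hAeq : pvStepA plots s x y (pvFreshD dists pq, seen) dir
      = if !(PySem.Set.contains seen p2) && plots.contains p2
        then (pvFreshD dists pq ++ [(p2, s + 1)], PySem.Set.add seen p2)
        else (pvFreshD dists pq, seen) := rfl
  have hBeq : pvStepD plots s x y dists (pq, cnt) dir
      = if plots.contains p2 && !(dists.contains p2)
        then (pvInsort pq (s + 1, cnt, p2), cnt + 1) else (pq, cnt) := rfl
  rw [hAeq, hBeq]
  by_cases hpl : plots.contains p2 = true
  · by_cases hd : dists.contains p2 = true
    · -- neighbour already finalized: both sides do nothing
      have hsp2 : PySem.Set.contains seen p2 = true := by rw [hseen]; simp [hd]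
      have hA' : (if (!PySem.Set.contains seen p2 && plots.contains p2) = true
          then (pvFreshD dists pq ++ [(p2, s + 1)], PySem.Set.add seen p2)
          else (pvFreshD dists pq, seen)) = (pvFreshD dists pq, seen) := by
        rw [if_neg (by rw [hsp2]; simp)]
      have hB' : (if (plots.contains p2 && !dists.contains p2) = true
          then (pvInsort pq (s + 1, cnt, p2), cnt + 1) else (pq, cnt)) = (pq, cnt) := by
        rw [if_neg (by rw [hd]; simp)]
      rw [hA', hB']
      exact ⟨rfl, hseen, hcnt, hhi, hlo, hsort⟩
    · -- B pushes; append form of the sorted insertion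
      have hdf : dists.contains p2 = false := by simpa using hd
      have happ : pvInsort pq (s + 1, cnt, p2) = pq ++ [(s + 1, cnt, p2)] :=
        pvInsort_append_of_ge pq _ (pvPushGe s cnt p2 pq hcnt hhi)
      have hB' : (if (plots.contains p2 && !dists.contains p2) = true
          then (pvInsort pq (s + 1, cnt, p2), cnt + 1) else (pq, cnt))
          = (pq ++ [(s + 1, cnt, p2)], cnt + 1) := by
        rw [if_pos (by rw [hpl, hdf]; rfl), happ]
      rw [hB']
      have hcnt' : ∀ e ∈ pq ++ [(s + 1, cnt, p2)], e.2.1 < cnt + 1 := by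
        intro e he
        rcases List.mem_append.1 he with he | he
        · have := hcnt e he; omega
        · simp at he; subst he; simp
      have hhi' : ∀ e ∈ pq ++ [(s + 1, cnt, p2)], e.1 ≤ s + 1 := by
        intro e he
        rcases List.mem_append.1 he with he | he
        · exact hhi e he
        · simp at he; subst he; simp
      have hlo' : ∀ e ∈ pq ++ [(s + 1, cnt, p2)], s ≤ e.1 := by
        intro e he
        rcases List.mem_append.1 he with he | he
        · exact hlo e he
        · simp at he; subst he; simp
      have hsort' : (pq ++ [(s + 1, cnt, p2)]).Pairwise (fun a b => a.1 ≤ b.1) := by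
        rw [List.pairwise_append]
        refine ⟨hsort, List.pairwise_singleton _ _, ?_⟩
        intro a ha b hb
        simp at hb; subst hb
        simpa using hhi a ha
      by_cases hq : pq.any (fun e => e.2.2 == p2) = true
      · -- duplicate of an in-queue position: A does nothing, B queues a stale entry
        have hsp2 : PySem.Set.contains seen p2 = true := by rw [hseen]; simp [hq]
        have hA' : (if (!PySem.Set.contains seen p2 && plots.contains p2) = true
            then (pvFreshD dists pq ++ [(p2, s + 1)], PySem.Set.add seen p2)
            else (pvFreshD dists pq, seen)) = (pvFreshD dists pq, seen) := by
          rw [if_neg (by rw [hsp2]; simp)]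
        rw [hA']
        have hmemmap : p2 ∈ pq.map (fun x => x.2.2) := by
          rcases List.any_eq_true.1 hq with ⟨e, he, hee⟩
          exact List.mem_map.2 ⟨e, he, by simpa using hee⟩
        have hfr : pvFreshD dists (pq ++ [(s + 1, cnt, p2)]) = pvFreshD dists pq :=
          pvFreshD_append_stale dists pq (s + 1, cnt, p2) (Or.inr hmemmap)
        rw [hfr]
        refine ⟨rfl, ?_, hcnt', hhi', hlo', hsort'⟩
        intro p
        rw [hseen p]
        simp only [List.any_append, List.any_cons, List.any_nil, Bool.or_false]
        by_cases hpp : p = p2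
        · subst hpp
          simp [hq]
        · have : ((p2 == p) : Bool) = false := by simp [Ne.symm hpp]
          simp [this]
      · -- genuinely new position: both sides queue it, A also marks it seen
        have hqf : pq.any (fun e => e.2.2 == p2) = false := Bool.eq_false_iff.2 hq
        have hsp2 : PySem.Set.contains seen p2 = false := by rw [hseen]; simp [hdf, hqf]
        have hA' : (if (!PySem.Set.contains seen p2 && plots.contains p2) = true
            then (pvFreshD dists pq ++ [(p2, s + 1)], PySem.Set.add seen p2)
            else (pvFreshD dists pq, seen))
            = (pvFreshD dists pq ++ [(p2, s + 1)], PySem.Set.add seen p2) := by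
          rw [if_pos (by rw [hsp2, hpl]; rfl)]
        rw [hA']
        have hnm : p2 ∉ pq.map (fun x => x.2.2) := by
          intro hmem
          rcases List.mem_map.1 hmem with ⟨e, he, hee⟩
          have : pq.any (fun e => e.2.2 == p2) = true :=
            List.any_eq_true.2 ⟨e, he, by simp [hee]⟩
          rw [hqf] at this; exact absurd this (by simp)
        have hfr : pvFreshD dists (pq ++ [(s + 1, cnt, p2)])
            = pvFreshD dists pq ++ [(p2, s + 1)] :=
          pvFreshD_append_fresh dists pq (s + 1, cnt, p2) hdf hnm
        rw [hfr]
        refine ⟨rfl, ?_, hcnt', hhi', hlo', hsort'⟩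
        intro p
        rw [pvSetContainsAdd, hseen p]
        simp only [List.any_append, List.any_cons, List.any_nil, Bool.or_false]
        by_cases hpp : p = p2
        · subst hpp; simp
        · have h1 : ((p2 == p) : Bool) = false := by simp [Ne.symm hpp]
          have h2 : ((p == p2) : Bool) = false := by simp [hpp]
          simp [h1, h2]
  · -- neighbour not a plot: both sides do nothing
    have hplf : plots.contains p2 = false := by simpa using hpl
    have hA' : (if (!PySem.Set.contains seen p2 && plots.contains p2) = true
        then (pvFreshD dists pq ++ [(p2, s + 1)], PySem.Set.add seen p2)
        else (pvFreshD dists pq, seen)) = (pvFreshD dists pq, seen) := by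
      rw [if_neg (by rw [hplf]; simp)]
    have hB' : (if (plots.contains p2 && !dists.contains p2) = true
        then (pvInsort pq (s + 1, cnt, p2), cnt + 1) else (pq, cnt)) = (pq, cnt) := by
      rw [if_neg (by rw [hplf]; simp)]
    rw [hA', hB']
    exact ⟨rfl, hseen, hcnt, hhi, hlo, hsort⟩

theorem pvFoldCorr (plots : List (List Int)) (s x y : Int)
    (dists : PySem.Dict (List Int) Int) :
    ∀ (ds : List (Int × Int)) (pq : List (Int × Int × List Int)) (cnt : Int)
      (seen : PySem.Set (List Int)), pvInvD s dists seen pq cnt →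
      (ds.foldl (pvStepA plots s x y) (pvFreshD dists pq, seen)).1
          = pvFreshD dists (ds.foldl (pvStepD plots s x y dists) (pq, cnt)).1
      ∧ pvInvD s dists (ds.foldl (pvStepA plots s x y) (pvFreshD dists pq, seen)).2
          (ds.foldl (pvStepD plots s x y dists) (pq, cnt)).1
          (ds.foldl (pvStepD plots s x y dists) (pq, cnt)).2 := by
  intro ds
  induction ds with
  | nil => intro pq cnt seen hinv; exact ⟨rfl, hinv⟩
  | cons dir ds ih =>
    intro pq cnt seen hinv
    rw [List.foldl_cons, List.foldl_cons]
    obtain ⟨hstep1, hstep2⟩ := pvStepCorr plots s x y dists seen pq cnt dir hinv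
    rw [hstep1]
    have := ih (pvStepD plots s x y dists (pq, cnt) dir).1
      (pvStepD plots s x y dists (pq, cnt) dir).2
      (pvStepA plots s x y (pvFreshD dists pq, seen) dir).2 hstep2
    simpa only [Prod.mk.eta] using this

theorem pvExpandCorr (plots : List (List Int)) (pos : List Int) (s : Int)
    (dists : PySem.Dict (List Int) Int) (pq : List (Int × Int × List Int)) (cnt : Int)
    (seen : PySem.Set (List Int)) (hinv : pvInvD s dists seen pq cnt) :
    (pvExpandA plots pos s (pvFreshD dists pq) seen).1
        = pvFreshD dists (pvExpandD plots s dists pos pq cnt).1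
    ∧ pvInvD s dists (pvExpandA plots pos s (pvFreshD dists pq) seen).2
        (pvExpandD plots s dists pos pq cnt).1 (pvExpandD plots s dists pos pq cnt).2 := by
  unfold pvExpandA pvExpandD
  match pos with
  | [] => exact ⟨rfl, hinv⟩
  | [_] => exact ⟨rfl, hinv⟩
  | [x, y] =>
    have hdd : pvDirsD = pvDirs := rfl
    rw [hdd]
    exact pvFoldCorr plots s x y dists pvDirs pq cnt seen hinv
  | _ :: _ :: _ :: _ => exact ⟨rfl, hinv⟩

-- main bisimulation: A run from the fresh subsequence of B's queue computes B's dict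
theorem pvSim (plots : List (List Int)) (start : List Int) (ms : Int) :
    ∀ (n : Nat) (pq : List (Int × Int × List Int)) (dists : PySem.Dict (List Int) Int)
      (cnt : Int) (seen : PySem.Set (List Int))
      (h : ∀ e ∈ pq, e.2.2 = start ∨ e.2.2 ∈ plots),
      pq.length + 5 * pvUnseenD (start :: plots) dists ≤ n →
      (∀ p, PySem.Set.contains seen p = (dists.contains p || pq.any (fun e => e.2.2 == p))) →
      (∀ e ∈ pq, e.2.1 < cnt) →
      pq.Pairwise (fun a b => a.1 ≤ b.1) →
      (∀ a ∈ pq, ∀ b ∈ pq, a.1 ≤ b.1 + 1) →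
      pvLoopA plots ms (pvFreshD dists pq) dists seen
        = pvLoopD plots start ms pq dists cnt h := by
  intro n
  induction n using Nat.strong_induction_on with
  | _ n ih =>
  intro pq dists cnt seen h hn hseen hcnt hsort hspread
  match pq with
  | [] =>
    rw [pvLoopD]
    show pvLoopA plots ms (pvFreshD dists []) dists seen = dists
    rw [show pvFreshD dists [] = ([] : List (List Int × Int)) from rfl, pvLoopA]
  | (s, c, pos) :: rest =>
    rw [pvLoopD]
    simp only [List.length_cons] at hn
    by_cases hc : dists.contains pos = true
    · -- stale entry: B skips it, A's queue does not mention it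
      rw [dif_pos hc]
      have hfr : pvFreshD dists ((s, c, pos) :: rest) = pvFreshD dists rest := by
        simp [pvFreshD, hc]
      rw [hfr]
      refine ih (rest.length + 5 * pvUnseenD (start :: plots) dists) (by omega)
        rest dists cnt seen (fun e he => h e (List.mem_cons_of_mem _ he)) (le_refl _)
        ?_ (fun e he => hcnt e (List.mem_cons_of_mem _ he)) (List.Pairwise.of_cons hsort)
        (fun a ha b hb => hspread a (List.mem_cons_of_mem _ ha) b (List.mem_cons_of_mem _ hb))
      intro p
      rw [hseen p]
      simp only [List.any_cons]
      by_cases hpp : pos = p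
      · subst hpp; simp [hc]
      · have : ((pos == p) : Bool) = false := by simp [hpp]
        simp [this]
    · -- fresh entry: both finalize pos at distance s
      rw [dif_neg hc]
      have hcf : dists.contains pos = false := Bool.eq_false_iff.2 hc
      have hfr : pvFreshD dists ((s, c, pos) :: rest)
          = (pos, s) :: pvFreshD (dists.insert pos s) rest := by
        simp [pvFreshD, hcf]
      rw [hfr, pvLoopA]
      have hmem : pos ∈ start :: plots := by
        rcases h (s, c, pos) List.mem_cons_self with h' | h'
        · exact h' ▸ List.mem_cons_self
        · exact List.mem_cons_of_mem _ h'
      have hU := pvUnseenD_insert (start :: plots) dists pos s hmem hcf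
      have hseen' : ∀ p, PySem.Set.contains seen p
          = ((dists.insert pos s).contains p || rest.any (fun e => e.2.2 == p)) := by
        intro p
        rw [hseen p, PySem.Dict.contains_insert]
        simp only [List.any_cons]
        by_cases hpp : p = pos
        · subst hpp; simp
        · have h1 : ((p == pos) : Bool) = false := by simp [hpp]
          have h2 : ((pos == p) : Bool) = false := by simp [Ne.symm hpp]
          simp [h1, h2]
      have hcnt' : ∀ e ∈ rest, e.2.1 < cnt := fun e he => hcnt e (List.mem_cons_of_mem _ he)
      have hhi' : ∀ e ∈ rest, e.1 ≤ s + 1 := fun e he =>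
        hspread e (List.mem_cons_of_mem _ he) (s, c, pos) List.mem_cons_self
      have hlo' : ∀ e ∈ rest, s ≤ e.1 := fun e he => (List.pairwise_cons.1 hsort).1 e he
      by_cases hms : s < ms
      · rw [if_pos hms, if_pos hms]
        have hinv : pvInvD s (dists.insert pos s) seen rest cnt :=
          ⟨hseen', hcnt', hhi', hlo', (List.pairwise_cons.1 hsort).2⟩
        obtain ⟨hE1, hE2⟩ :=
          pvExpandCorr plots pos s (dists.insert pos s) rest cnt seen hinv
        show pvLoopA plots ms
            (pvExpandA plots pos s (pvFreshD (dists.insert pos s) rest) seen).1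
            (dists.insert pos s)
            (pvExpandA plots pos s (pvFreshD (dists.insert pos s) rest) seen).2 = _
        rw [hE1]
        obtain ⟨hseen2, hcnt2, hhi2, hlo2, hsort2⟩ := hE2
        have hlen := pvExpandD_length plots s (dists.insert pos s) pos rest cnt
        exact ih ((pvExpandD plots s (dists.insert pos s) pos rest cnt).1.length
            + 5 * pvUnseenD (start :: plots) (dists.insert pos s)) (by omega)
          _ _ _ _ _ (le_refl _) hseen2 hcnt2 hsort2
          (fun a ha b hb => by have := hhi2 a ha; have := hlo2 b hb; omega)
      · rw [if_neg hms, if_neg hms]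
        exact ih (rest.length + 5 * pvUnseenD (start :: plots) (dists.insert pos s)) (by omega)
          rest (dists.insert pos s) cnt seen (fun e he => h e (List.mem_cons_of_mem _ he))
          (le_refl _) hseen' hcnt' (List.Pairwise.of_cons hsort)
          (fun a ha b hb => hspread a (List.mem_cons_of_mem _ ha) b (List.mem_cons_of_mem _ hb))

theorem pvInsert_twice (start : List Int) :
    ((PySem.Dict.empty : PySem.Dict (List Int) Int).insert start 0).insert start 0
      = (PySem.Dict.empty : PySem.Dict (List Int) Int).insert start 0 := by
  simp [PySem.Dict.empty, PySem.Dict.insert, PySem.Dict.contains]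

-- ===== VERDICT (by name: the statement is the Claim_ definition above) =====
theorem walk_dists_spec : Claim_equal_walk_dists := by
  intro plots start max_steps _ _
  unfold Spec_walk_dists walk_dists walk_dists_alt
  have hpf0 : ∀ e ∈ ([(0, 0, start)] : List (Int × Int × List Int)),
      e.2.2 = start ∨ e.2.2 ∈ plots :=
    fun e he => Or.inl (by simp at he; simp [he])
  have hdicts : pvLoopA plots max_steps [(start, 0)]
        ((PySem.Dict.empty : PySem.Dict (List Int) Int).insert start 0)
        (PySem.Set.add (PySem.Set.empty : PySem.Set (List Int)) start)
      = pvLoopD plots start max_steps [(0, 0, start)]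
          (PySem.Dict.empty : PySem.Dict (List Int) Int) 1 hpf0 := by
    rw [pvLoopA, pvLoopD]
    rw [dif_neg (by simp : ¬ ((PySem.Dict.empty : PySem.Dict (List Int) Int).contains start
        = true))]
    by_cases hms : (0 : Int) < max_steps
    · rw [if_pos hms, if_pos hms, pvInsert_twice]
      show pvLoopA plots max_steps
          (pvExpandA plots start 0 []
            (PySem.Set.add (PySem.Set.empty : PySem.Set (List Int)) start)).1
          ((PySem.Dict.empty : PySem.Dict (List Int) Int).insert start 0)
          (pvExpandA plots start 0 []
            (PySem.Set.add (PySem.Set.empty : PySem.Set (List Int)) start)).2 = _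
      have h0 : ∀ p, PySem.Set.contains
          (PySem.Set.add (PySem.Set.empty : PySem.Set (List Int)) start) p
          = (((PySem.Dict.empty : PySem.Dict (List Int) Int).insert start 0).contains p
            || ([] : List (Int × Int × List Int)).any (fun e => e.2.2 == p)) := by
        intro p
        rw [pvSetContainsAdd, PySem.Dict.contains_insert]
        simp [PySem.Set.contains]
      have hinv0 : pvInvD 0 ((PySem.Dict.empty : PySem.Dict (List Int) Int).insert start 0)
          (PySem.Set.add (PySem.Set.empty : PySem.Set (List Int)) start)
          ([] : List (Int × Int × List Int)) 1 :=
        ⟨h0, by simp, by simp, by simp, List.Pairwise.nil⟩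
      obtain ⟨hE1, hE2⟩ := pvExpandCorr plots start 0
        ((PySem.Dict.empty : PySem.Dict (List Int) Int).insert start 0) [] 1
        (PySem.Set.add (PySem.Set.empty : PySem.Set (List Int)) start) hinv0
      rw [show ([] : List (List Int × Int))
          = pvFreshD ((PySem.Dict.empty : PySem.Dict (List Int) Int).insert start 0) [] from rfl,
        hE1]
      obtain ⟨hseen2, hcnt2, hhi2, hlo2, hsort2⟩ := hE2
      have hpf : ∀ e ∈ (pvExpandD plots 0
            ((PySem.Dict.empty : PySem.Dict (List Int) Int).insert start 0) start [] 1).1,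
          e.2.2 = start ∨ e.2.2 ∈ plots := fun e he =>
        match pvExpandD_mem plots 0
            ((PySem.Dict.empty : PySem.Dict (List Int) Int).insert start 0) start [] 1 e he with
        | Or.inl hin => absurd hin (List.not_mem_nil)
        | Or.inr hp => Or.inr hp
      exact pvSim plots start max_steps _ _ _ _ _ hpf (le_refl _) hseen2 hcnt2 hsort2
        (fun a ha b hb => by have := hhi2 a ha; have := hlo2 b hb; omega)
    · rw [if_neg hms, if_neg hms, pvInsert_twice, pvLoopA, pvLoopD]
  exact congrArg PySem.Dict.items hdicts
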